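-- pv_equiv track=rewrite | github.com/AlexLagin/BP | bp_code.py | find_neperspektivne
-- ===== SOURCE A (Python) =====
-- def parse_production(prod):
--     """Rozdelí reťazec produkcie na jednotlivé znaky."""
--     return list(prod)
--
-- def find_neperspektivne(grammar, non_terminals):
--     """
--     Zistí neperspektívne (neproduktívne) neterminály.
--     Neterminál je produktívny, ak existuje produkcia vedúca k reťazcu len z terminálov (alebo ε).
--     """
--     productive = set()
--     changed = True
--     while changed:
--         changed = False
--         for nt, productions in grammar.items():
--             if nt in productive:
--                 continue
--             for prod in productions:
--                 symbols = parse_production(prod)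
--                 is_prod = True
--                 for sym in symbols:
--                     if sym in non_terminals and sym not in productive:
--                         is_prod = False
--                         break
--                 if is_prod:
--                     productive.add(nt)
--                     changed = True
--                     break
--     return set(non_terminals) - productive
-- ===== SOURCE B (Python) =====
-- def find_neperspektivne(grammar, non_terminals):
--     """
--     Worklist algorithm with a reverse index symbol -> productions:
--     instead of repeated full passes over the grammar, each production is
--     re-checked only when one of its nonterminal symbols becomes productive.
--     """
--     nts = set(non_terminals)
--     occs = {}          # symbol -> productions (lhs, rhs) containing it as a nonterminal
--     productive = set()
--     stack = []
--     for nt, productions in grammar.items():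
--         for p in productions:
--             has_nt = False
--             for s in p:
--                 if s in nts:
--                     has_nt = True
--                     occs.setdefault(s, []).append((nt, p))
--             if not has_nt and nt not in productive:
--                 productive.add(nt)
--                 stack.append(nt)
--     while stack:
--         x = stack.pop()
--         for nt, p in occs.get(x, ()):
--             if nt not in productive and all(s not in nts or s in productive for s in p):
--                 productive.add(nt)
--                 stack.append(nt)
--     return nts - productive
-- ===== Notes on version B (the rewrite author's own statement) =====
-- stated objective: faster
-- what changed: A repeatedly re-scans the whole grammar until a full pass adds no productive nonterminal; B makes one setup pass building a reverse index symbol -> productions, marks the productions without nonterminal symbols, and then runs a worklist that re-checks a production only when one of its nonterminal symbols becomes productive, finally returning set(non_terminals) - productive as before.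
import Mathlib
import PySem

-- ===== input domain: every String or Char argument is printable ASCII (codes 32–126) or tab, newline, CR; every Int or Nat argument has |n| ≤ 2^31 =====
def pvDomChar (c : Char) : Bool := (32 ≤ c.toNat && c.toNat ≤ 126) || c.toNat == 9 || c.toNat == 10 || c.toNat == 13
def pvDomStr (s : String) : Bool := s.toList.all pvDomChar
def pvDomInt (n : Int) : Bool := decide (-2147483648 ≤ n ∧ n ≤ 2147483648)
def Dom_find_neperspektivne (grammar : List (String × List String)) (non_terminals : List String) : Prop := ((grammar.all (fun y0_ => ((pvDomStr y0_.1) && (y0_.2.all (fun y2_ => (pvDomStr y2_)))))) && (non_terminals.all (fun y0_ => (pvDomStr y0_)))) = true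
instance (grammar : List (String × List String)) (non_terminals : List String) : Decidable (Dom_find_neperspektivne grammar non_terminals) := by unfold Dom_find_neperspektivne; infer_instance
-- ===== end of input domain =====

-- B replaces A's repeated full fixpoint passes by a worklist with a reverse index symbol → productions
-- (each production is re-checked only when one of its nonterminal symbols becomes productive): faster in a timing run.

-- ===== PORT A =====
-- parse_production(prod) = list(prod)
def pvParseProduction (prod : String) : List Char := prod.toList

-- A's inner 'for sym in symbols: if sym in non_terminals and sym not in productive: is_prod=False; break'
def pvIsProdA (non_terminals : List String) (productive : PySem.Set String) (prod : String) : Bool :=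
  (pvParseProduction prod).all (fun c =>
    !(non_terminals.contains (String.ofList [c])) || PySem.Set.contains productive (String.ofList [c]))

-- one pass of A's 'for nt, productions in grammar.items()' body; .2 = changed
def pvPassA (non_terminals : List String) (items : List (String × List String))
    (P : PySem.Set String) : PySem.Set String × Bool :=
  items.foldl (fun st e =>
    if PySem.Set.contains st.1 e.1 then st
    else if e.2.any (pvIsProdA non_terminals st.1) then (PySem.Set.add st.1 e.1, true)
    else st) (P, false)

-- A's 'while changed' loop; fuel items.length+1 always suffices (each changed pass adds a new key)
def pvLoopA (non_terminals : List String) (items : List (String × List String)) :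
    Nat → PySem.Set String → PySem.Set String
  | 0, P => P
  | fuel+1, P =>
    let st := pvPassA non_terminals items P
    if st.2 then pvLoopA non_terminals items fuel st.1 else st.1

def find_neperspektivne (grammar : List (String × List String)) (non_terminals : List String) : List String :=
  let items := (PySem.Dict.ofList grammar).items
  let productive := pvLoopA non_terminals items (items.length + 1) PySem.Set.empty
  PySem.Set.diff (PySem.Set.ofList non_terminals) productive

-- ===== PORT B =====
-- 'all(s not in nts or s in productive for s in p)'
def pvGoodB (nts : PySem.Set String) (P : PySem.Set String) (p : String) : Bool :=
  p.toList.all (fun c =>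
    !(PySem.Set.contains nts (String.ofList [c])) || PySem.Set.contains P (String.ofList [c]))

-- 'for s in p: if s in nts: has_nt = True; occs.setdefault(s, []).append((nt, p))'
def pvScanProd (nts : PySem.Set String) (nt : String) (p : String)
    (occs : PySem.Dict String (List (String × String))) :
    PySem.Dict String (List (String × String)) × Bool :=
  p.toList.foldl (fun st c =>
    if PySem.Set.contains nts (String.ofList [c]) then
      (st.1.modify (String.ofList [c]) [] (· ++ [(nt, p)]), true)
    else st) (occs, false)

-- the setup loop over grammar.items(); state = (occs, productive, stack); the stack's top
-- (Python's list END, where append/pop work) is kept at the Lean list's HEAD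
def pvSetupB (nts : PySem.Set String) (items : List (String × List String)) :
    PySem.Dict String (List (String × String)) × PySem.Set String × List String :=
  items.foldl (fun st e =>
    e.2.foldl (fun st p =>
      let sc := pvScanProd nts e.1 p st.1
      if !sc.2 && !(PySem.Set.contains st.2.1 e.1) then
        (sc.1, PySem.Set.add st.2.1 e.1, e.1 :: st.2.2)
      else (sc.1, st.2.1, st.2.2)) st) (PySem.Dict.empty, PySem.Set.empty, [])

-- 'for nt, p in occs.get(x, ()): if nt not in productive and all(...): add; push'
def pvInnerB (nts : PySem.Set String) (L : List (String × String))
    (P : PySem.Set String) (S : List String) : PySem.Set String × List String :=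
  L.foldl (fun st q =>
    if !(PySem.Set.contains st.1 q.1) && pvGoodB nts st.1 q.2 then
      (PySem.Set.add st.1 q.1, q.1 :: st.2)
    else st) (P, S)

-- 'while stack: x = stack.pop(); …'; fuel items.length+1 always suffices (see proof below)
def pvLoopB (nts : PySem.Set String) (occs : PySem.Dict String (List (String × String))) :
    Nat → PySem.Set String → List String → PySem.Set String
  | _, P, [] => P
  | 0, P, _ => P
  | fuel+1, P, x :: rest =>
    let st := pvInnerB nts (occs.getD x []) P rest
    pvLoopB nts occs fuel st.1 st.2

def find_neperspektivne_alt (grammar : List (String × List String)) (non_terminals : List String) : List String :=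
  let nts := PySem.Set.ofList non_terminals
  let items := (PySem.Dict.ofList grammar).items
  let st := pvSetupB nts items
  let Pf := pvLoopB nts st.1 (items.length + 1) st.2.1 st.2.2
  PySem.Set.diff nts Pf

-- ===== PRECONDITION & SPEC =====
def Spec_find_neperspektivne (grammar : List (String × List String)) (non_terminals : List String) (out : List String) : Prop := out = find_neperspektivne_alt grammar non_terminals
instance (grammar : List (String × List String)) (non_terminals : List String) (out : List String) : Decidable (Spec_find_neperspektivne grammar non_terminals out) := by unfold Spec_find_neperspektivne; infer_instance

-- ===== CLAIM (what is proved, stated in full; the proofs are below) =====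
def Claim_equal_find_neperspektivne : Prop := ∀ (grammar : List (String × List String)) (non_terminals : List String), Dom_find_neperspektivne grammar non_terminals → Spec_find_neperspektivne grammar non_terminals (find_neperspektivne grammar non_terminals)

-- ===== LEMMAS AND PROOFS =====

-- the flattened production list of the (dict-normalised) grammar
def pvProds (items : List (String × List String)) : List (String × String) :=
  items.flatMap (fun e => e.2.map (fun p => (e.1, p)))

-- the productive nonterminals, characterised inductively (least fixpoint)
inductive pvProv (nts : List String) (prods : List (String × String)) : String → Prop
  | mk (nt p : String) (h : (nt, p) ∈ prods)
      (hall : ∀ c ∈ p.toList, String.ofList [c] ∈ nts → pvProv nts prods (String.ofList [c])) :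
      pvProv nts prods nt

-- a production all of whose nonterminal symbols lie in P
def pvGood (nts : List String) (P : List String) (p : String) : Prop :=
  ∀ c ∈ p.toList, String.ofList [c] ∈ nts → String.ofList [c] ∈ P

def pvSound (nts : List String) (prods : List (String × String)) (P : List String) : Prop :=
  ∀ x ∈ P, pvProv nts prods x

def pvStable (nts : List String) (prods : List (String × String)) (P : List String) : Prop :=
  ∀ q ∈ prods, pvGood nts P q.2 → q.1 ∈ P

-- bridging facts
theorem pv_isProdA_iff (nts : List String) (P : PySem.Set String) (p : String) :
    pvIsProdA nts P p = true ↔ pvGood nts P p := by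
  simp [pvIsProdA, pvParseProduction, pvGood, PySem.Set.contains]
  constructor
  · intro h c hc hn
    rcases h c hc with h' | h'
    · exact absurd hn h'
    · exact h'
  · intro h c hc
    by_cases hn : String.ofList [c] ∈ nts
    · exact Or.inr (h c hc hn)
    · exact Or.inl hn

theorem pv_prov_of_good (nts : List String) (prods : List (String × String)) (P : List String)
    (nt p : String) (h : (nt, p) ∈ prods) (hg : pvGood nts P p) (hs : pvSound nts prods P) :
    pvProv nts prods nt :=
  .mk nt p h (fun c hc hcn => hs _ (hg c hc hcn))

theorem pv_mem_iff_prov (nts : List String) (prods : List (String × String)) (P : List String)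
    (hs : pvSound nts prods P) (hst : pvStable nts prods P) :
    ∀ x, x ∈ P ↔ pvProv nts prods x := by
  intro x
  constructor
  · exact hs x
  · intro h
    induction h with
    | mk nt p hmem hall ih => exact hst (nt, p) hmem (fun c hc hcn => ih c hc hcn)

theorem pv_mem_prods (items : List (String × List String)) (e : String × List String)
    (he : e ∈ items) (p : String) (hp : p ∈ e.2) : (e.1, p) ∈ pvProds items := by
  simp only [pvProds, List.mem_flatMap, List.mem_map]
  exact ⟨e, he, p, hp, rfl⟩

-- ---- A side: properties of one pass (as a foldl over any suffix l) ----

def paStep (nts : List String) (st : PySem.Set String × Bool) (e : String × List String) :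
    PySem.Set String × Bool :=
  if PySem.Set.contains st.1 e.1 then st
  else if e.2.any (pvIsProdA nts st.1) then (PySem.Set.add st.1 e.1, true)
  else st

theorem pvPassA_eq (nts : List String) (items : List (String × List String)) (P : PySem.Set String) :
    pvPassA nts items P = List.foldl (paStep nts) (P, false) items := rfl

theorem pa_mem (nts : List String) (l : List (String × List String))
    (st : PySem.Set String × Bool) (x : String)
    (hx : x ∈ (List.foldl (paStep nts) st l).1) : x ∈ st.1 ∨ x ∈ l.map (·.1) := by
  induction l generalizing st with
  | nil => exact Or.inl hx
  | cons e l ih =>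
    simp only [List.foldl_cons] at hx
    simp only [List.map_cons, List.mem_cons]
    rw [show paStep nts st e = if PySem.Set.contains st.1 e.1 then st else if e.2.any (pvIsProdA nts st.1) then (PySem.Set.add st.1 e.1, true) else st from rfl] at hx
    split at hx
    · rcases ih st hx with h | h
      · exact Or.inl h
      · exact Or.inr (Or.inr h)
    · split at hx
      · rcases ih _ hx with h | h
        · rcases (PySem.Set.mem_add _ _ _).1 h with h' | h'
          · exact Or.inl h'
          · exact Or.inr (Or.inl h')
        · exact Or.inr (Or.inr h)
      · rcases ih st hx with h | h
        · exact Or.inl h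
        · exact Or.inr (Or.inr h)

theorem pa_nodup (nts : List String) (l : List (String × List String))
    (st : PySem.Set String × Bool) (h : st.1.Nodup) :
    (List.foldl (paStep nts) st l).1.Nodup := by
  induction l generalizing st with
  | nil => exact h
  | cons e l ih =>
    simp only [List.foldl_cons]
    unfold paStep
    split
    · exact ih st h
    · split
      · exact ih _ (PySem.Set.nodup_add _ _ h)
      · exact ih st h

theorem pa_len (nts : List String) (l : List (String × List String))
    (st : PySem.Set String × Bool) :
    st.1.length ≤ (List.foldl (paStep nts) st l).1.length := by
  induction l generalizing st with
  | nil => exact le_refl _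
  | cons e l ih =>
    simp only [List.foldl_cons]
    unfold paStep
    split
    · exact ih st
    · split
      · refine le_trans ?_ (ih _)
        simp [PySem.Set.add_eq_ite]
        split <;> simp
      · exact ih st

theorem pa_unchanged (nts : List String) (l : List (String × List String))
    (st : PySem.Set String × Bool)
    (h : (List.foldl (paStep nts) st l).2 = false) :
    (List.foldl (paStep nts) st l).1 = st.1 ∧ st.2 = false := by
  induction l generalizing st with
  | nil => exact ⟨rfl, h⟩
  | cons e l ih =>
    simp only [List.foldl_cons] at h ⊢
    rw [show paStep nts st e = if PySem.Set.contains st.1 e.1 then st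
      else if e.2.any (pvIsProdA nts st.1) then (PySem.Set.add st.1 e.1, true) else st from rfl] at h ⊢
    split at h
    · rename_i hc
      rw [if_pos hc]
      exact ih st h
    · rename_i hc
      rw [if_neg hc]
      split at h
      · exact absurd (ih _ h).2 (by simp)
      · rename_i hany
        rw [if_neg hany]
        exact ih st h

theorem pa_changed_grows (nts : List String) (l : List (String × List String))
    (st : PySem.Set String × Bool) (hst : st.2 = false)
    (h : (List.foldl (paStep nts) st l).2 = true) :
    st.1.length < (List.foldl (paStep nts) st l).1.length := by
  induction l generalizing st with
  | nil => rw [List.foldl_nil] at h; rw [hst] at h; cases h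
  | cons e l ih =>
    simp only [List.foldl_cons] at h ⊢
    rw [show paStep nts st e = if PySem.Set.contains st.1 e.1 then st
      else if e.2.any (pvIsProdA nts st.1) then (PySem.Set.add st.1 e.1, true) else st from rfl] at h ⊢
    split at h
    · rename_i hc
      rw [if_pos hc]
      exact ih st hst h
    · rename_i hc
      rw [if_neg hc]
      split at h
      · rename_i hany
        rw [if_pos hany]
        refine lt_of_lt_of_le ?_ (pa_len nts l _)
        show st.1.length < (PySem.Set.add st.1 e.1).length
        rw [PySem.Set.add_of_not_mem (by simpa [PySem.Set.contains, List.contains_iff_mem] using hc)]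
        simp
      · rename_i hany
        rw [if_neg hany]
        exact ih st hst h

theorem pa_sound (nts : List String) (prods : List (String × String))
    (l : List (String × List String))
    (hl : ∀ e ∈ l, ∀ p ∈ e.2, (e.1, p) ∈ prods)
    (st : PySem.Set String × Bool) (hs : pvSound nts prods st.1) :
    pvSound nts prods (List.foldl (paStep nts) st l).1 := by
  induction l generalizing st with
  | nil => exact hs
  | cons e l ih =>
    simp only [List.foldl_cons]
    unfold paStep
    split
    · exact ih (fun e' he' => hl e' (List.mem_cons_of_mem _ he')) st hs
    · split
      · rename_i hany
        refine ih (fun e' he' => hl e' (List.mem_cons_of_mem _ he')) _ ?_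
        intro x hx
        rcases (PySem.Set.mem_add _ _ _).1 hx with hx' | hx'
        · exact hs x hx'
        · subst hx'
          rcases List.any_eq_true.1 hany with ⟨p, hp, hgp⟩
          exact pv_prov_of_good nts prods st.1 e.1 p
            (hl e (List.mem_cons_self) p hp) ((pv_isProdA_iff nts st.1 p).1 hgp) hs
      · exact ih (fun e' he' => hl e' (List.mem_cons_of_mem _ he')) st hs

theorem pa_stable_of_false (nts : List String) (l : List (String × List String))
    (st : PySem.Set String × Bool)
    (h : (List.foldl (paStep nts) st l).2 = false) :
    ∀ e ∈ l, ∀ p ∈ e.2, e.1 ∈ st.1 ∨ pvIsProdA nts st.1 p = false := by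
  induction l generalizing st with
  | nil => simp
  | cons e l ih =>
    simp only [List.foldl_cons] at h
    rw [show paStep nts st e = if PySem.Set.contains st.1 e.1 then st
      else if e.2.any (pvIsProdA nts st.1) then (PySem.Set.add st.1 e.1, true) else st from rfl] at h
    intro e' he' p hp
    rcases List.mem_cons.1 he' with rfl | he'
    · split at h
      · rename_i hc
        exact Or.inl (by simpa [PySem.Set.contains, List.contains_iff_mem] using hc)
      · split at h
        · exact absurd (pa_unchanged nts l _ h).2 (by simp)
        · rename_i hany
          exact Or.inr (by simpa using (List.any_eq_false.1 (by simpa using hany)) p hp)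
    · split at h
      · exact ih st h e' he' p hp
      · split at h
        · exact absurd (pa_unchanged nts l _ h).2 (by simp)
        · exact ih st h e' he' p hp

-- A's while-loop reaches a sound and stable set when given fuel > (#distinct keys − |P|)
theorem pa_loop_spec (nts : List String) (items : List (String × List String)) :
    ∀ fuel (P : PySem.Set String), P.Nodup → (∀ x ∈ P, x ∈ items.map (·.1)) →
    pvSound nts (pvProds items) P →
    (PySem.Set.ofList (items.map (·.1))).length < fuel + P.length →
    pvSound nts (pvProds items) (pvLoopA nts items fuel P) ∧
      pvStable nts (pvProds items) (pvLoopA nts items fuel P) := by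
  intro fuel
  induction fuel with
  | zero =>
    intro P hnd hsub _ hlt
    exfalso
    have hP : P ⊆ PySem.Set.ofList (items.map (·.1)) := by
      intro x hx
      exact (PySem.Set.mem_ofList _ _).2 (hsub x hx)
    have := (List.subperm_of_subset hnd hP).length_le
    omega
  | succ fuel ih =>
    intro P hnd hsub hs hlt
    show pvSound _ _ (pvLoopA nts items (fuel+1) P) ∧ _
    rw [pvLoopA]
    simp only [pvPassA_eq]
    split
    · rename_i hch
      have hgrow := pa_changed_grows nts items (P, false) rfl hch
      refine ih _ (pa_nodup nts items (P, false) hnd) ?_ ?_ ?_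
      · intro x hx
        rcases pa_mem nts items (P, false) x hx with h | h
        · exact hsub x h
        · exact h
      · exact pa_sound nts (pvProds items) items (fun e he p hp => pv_mem_prods items e he p hp)
          (P, false) hs
      · simp only at hgrow; omega
    · rename_i hch
      have hfalse : (List.foldl (paStep nts) (P, false) items).2 = false := by
        simpa using hch
      have hun := (pa_unchanged nts items (P, false) hfalse).1
      rw [hun]
      refine ⟨hs, ?_⟩
      intro q hq hgood
      simp only [pvProds, List.mem_flatMap, List.mem_map] at hq
      rcases hq with ⟨e, he, p, hp, hqe⟩
      rcases pa_stable_of_false nts items (P, false) hfalse e he p hp with h | h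
      · rw [← hqe]; exact h
      · exfalso
        rw [← hqe] at hgood
        exact absurd ((pv_isProdA_iff nts P p).2 hgood) (by simp [h])

-- ---- B side: bridging facts ----

theorem pv_goodB_iff (nts : List String) (P : PySem.Set String) (p : String) :
    pvGoodB (PySem.Set.ofList nts) P p = true ↔ pvGood nts P p := by
  simp [pvGoodB, pvGood, PySem.Set.contains, PySem.Set.mem_ofList]
  constructor
  · intro h c hc hn
    rcases h c hc with h' | h'
    · exact absurd hn h'
    · exact h'
  · intro h c hc
    by_cases hn : String.ofList [c] ∈ nts
    · exact Or.inr (h c hc hn)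
    · exact Or.inl hn

-- ---- B side: the per-production symbol scan ----

def sbScan (ntsS : PySem.Set String) (nt p : String) (cs : List Char)
    (st : PySem.Dict String (List (String × String)) × Bool) :
    PySem.Dict String (List (String × String)) × Bool :=
  cs.foldl (fun st c =>
    if PySem.Set.contains ntsS (String.ofList [c]) then
      (st.1.modify (String.ofList [c]) [] (· ++ [(nt, p)]), true)
    else st) st

theorem pvScanProd_eq (ntsS : PySem.Set String) (nt p : String)
    (occs : PySem.Dict String (List (String × String))) :
    pvScanProd ntsS nt p occs = sbScan ntsS nt p p.toList (occs, false) := rfl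

theorem sc_snd (ntsS : PySem.Set String) (nt p : String) (cs : List Char)
    (st : PySem.Dict String (List (String × String)) × Bool) :
    (sbScan ntsS nt p cs st).2
      = (st.2 || cs.any (fun c => PySem.Set.contains ntsS (String.ofList [c]))) := by
  induction cs generalizing st with
  | nil => simp [sbScan]
  | cons c cs ih =>
    rw [show sbScan ntsS nt p (c :: cs) st = sbScan ntsS nt p cs
        (if PySem.Set.contains ntsS (String.ofList [c]) then
          (st.1.modify (String.ofList [c]) [] (· ++ [(nt, p)]), true)
        else st) from rfl, List.any_cons]
    split
    · rename_i hc
      rw [ih]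
      simp only [hc]
      simp
    · rename_i hc
      rw [ih]
      simp only [Bool.not_eq_true] at hc
      simp only [hc]
      simp

theorem sc_mem (ntsS : PySem.Set String) (nt p : String) (cs : List Char)
    (st : PySem.Dict String (List (String × String)) × Bool)
    (q : String × String) (s : String) :
    q ∈ (sbScan ntsS nt p cs st).1.getD s [] ↔
      q ∈ st.1.getD s [] ∨
        (q = (nt, p) ∧ ∃ c ∈ cs, PySem.Set.contains ntsS (String.ofList [c]) ∧ String.ofList [c] = s) := by
  induction cs generalizing st with
  | nil => simp [sbScan]
  | cons c cs ih =>
    rw [show sbScan ntsS nt p (c :: cs) st = sbScan ntsS nt p cs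
        (if PySem.Set.contains ntsS (String.ofList [c]) then
          (st.1.modify (String.ofList [c]) [] (· ++ [(nt, p)]), true)
        else st) from rfl]
    split
    · rename_i hc
      rw [ih]
      simp only [PySem.Dict.getD_modify]
      constructor
      · rintro (h | h)
        · split at h
          · rename_i hs
            rcases List.mem_append.1 h with h' | h'
            · exact Or.inl (by rw [hs]; exact h')
            · simp only [List.mem_singleton] at h'
              exact Or.inr ⟨h', c, List.mem_cons_self, hc, hs.symm⟩
          · exact Or.inl h
        · exact Or.inr ⟨h.1, by rcases h.2 with ⟨c', hc', h1, h2⟩; exact ⟨c', List.mem_cons_of_mem _ hc', h1, h2⟩⟩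
      · rintro (h | ⟨rfl, c', hc', h1, h2⟩)
        · refine Or.inl ?_
          split
          · rename_i hs
            exact List.mem_append.2 (Or.inl (by rw [← hs]; exact h))
          · exact h
        · rcases List.mem_cons.1 hc' with rfl | hc''
          · refine Or.inl ?_
            rw [if_pos h2.symm]
            simp
          · exact Or.inr ⟨rfl, c', hc'', h1, h2⟩
    · rename_i hc
      rw [ih]
      constructor
      · rintro (h | ⟨rfl, c', hc', h1, h2⟩)
        · exact Or.inl h
        · exact Or.inr ⟨rfl, c', List.mem_cons_of_mem _ hc', h1, h2⟩
      · rintro (h | ⟨rfl, c', hc', h1, h2⟩)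
        · exact Or.inl h
        · rcases List.mem_cons.1 hc' with rfl | hc''
          · exact absurd h1 (by simpa using hc)
          · exact Or.inr ⟨rfl, c', hc'', h1, h2⟩

-- ---- B side: the setup loop ----

def sbStepP (ntsS : PySem.Set String) (nt : String)
    (st : PySem.Dict String (List (String × String)) × PySem.Set String × List String)
    (p : String) :
    PySem.Dict String (List (String × String)) × PySem.Set String × List String :=
  if !(pvScanProd ntsS nt p st.1).2 && !(PySem.Set.contains st.2.1 nt) then
    ((pvScanProd ntsS nt p st.1).1, PySem.Set.add st.2.1 nt, nt :: st.2.2)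
  else ((pvScanProd ntsS nt p st.1).1, st.2.1, st.2.2)

theorem pvSetupB_eq (ntsS : PySem.Set String) (items : List (String × List String)) :
    pvSetupB ntsS items
      = items.foldl (fun st e => e.2.foldl (sbStepP ntsS e.1) st)
          (PySem.Dict.empty, PySem.Set.empty, []) := rfl

def sbInv (nts keys : List String) (prods : List (String × String))
    (st : PySem.Dict String (List (String × String)) × PySem.Set String × List String) : Prop :=
  (∀ s q, q ∈ st.1.getD s [] → q ∈ prods) ∧
  (∀ x, x ∈ st.2.2 ↔ x ∈ st.2.1) ∧
  st.2.1.Nodup ∧ st.2.2.Nodup ∧ st.2.2.length = st.2.1.length ∧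
  (∀ x ∈ st.2.1, x ∈ keys) ∧ pvSound nts prods st.2.1

theorem sb_stepP_mono (ntsS : PySem.Set String) (nt p : String)
    (st : PySem.Dict String (List (String × String)) × PySem.Set String × List String) :
    (∀ x ∈ st.2.1, x ∈ (sbStepP ntsS nt st p).2.1) ∧
      (∀ s q, q ∈ st.1.getD s [] → q ∈ (sbStepP ntsS nt st p).1.getD s []) := by
  unfold sbStepP
  constructor
  · intro x hx
    split
    · exact (PySem.Set.mem_add _ _ _).2 (Or.inl hx)
    · exact hx
  · intro s q hq
    have : q ∈ (pvScanProd ntsS nt p st.1).1.getD s [] := by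
      rw [pvScanProd_eq]
      exact (sc_mem ntsS nt p p.toList (st.1, false) q s).2 (Or.inl hq)
    split <;> exact this

theorem sb_foldP_mono (ntsS : PySem.Set String) (nt : String) (ps : List String)
    (st : PySem.Dict String (List (String × String)) × PySem.Set String × List String) :
    (∀ x ∈ st.2.1, x ∈ (ps.foldl (sbStepP ntsS nt) st).2.1) ∧
      (∀ s q, q ∈ st.1.getD s [] → q ∈ (ps.foldl (sbStepP ntsS nt) st).1.getD s []) := by
  induction ps generalizing st with
  | nil => exact ⟨fun x hx => hx, fun s q hq => hq⟩
  | cons p ps ih =>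
    simp only [List.foldl_cons]
    exact ⟨fun x hx => (ih _).1 x ((sb_stepP_mono ntsS nt p st).1 x hx),
           fun s q hq => (ih _).2 s q ((sb_stepP_mono ntsS nt p st).2 s q hq)⟩

theorem sb_fold_mono (ntsS : PySem.Set String) (l : List (String × List String))
    (st : PySem.Dict String (List (String × String)) × PySem.Set String × List String) :
    (∀ x ∈ st.2.1, x ∈ (l.foldl (fun st e => e.2.foldl (sbStepP ntsS e.1) st) st).2.1) ∧
      (∀ s q, q ∈ st.1.getD s [] →
        q ∈ (l.foldl (fun st e => e.2.foldl (sbStepP ntsS e.1) st) st).1.getD s []) := by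
  induction l generalizing st with
  | nil => exact ⟨fun x hx => hx, fun s q hq => hq⟩
  | cons e l ih =>
    simp only [List.foldl_cons]
    exact ⟨fun x hx => (ih _).1 x ((sb_foldP_mono ntsS e.1 e.2 st).1 x hx),
           fun s q hq => (ih _).2 s q ((sb_foldP_mono ntsS e.1 e.2 st).2 s q hq)⟩

theorem sb_stepP_inv (nts keys : List String) (prods : List (String × String))
    (nt : String) (hk : nt ∈ keys) (p : String) (hp : (nt, p) ∈ prods)
    (st : PySem.Dict String (List (String × String)) × PySem.Set String × List String)
    (h : sbInv nts keys prods st) :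
    sbInv nts keys prods (sbStepP (PySem.Set.ofList nts) nt st p) := by
  obtain ⟨h1, h2, h3, h4, h5, h6, h7⟩ := h
  have hocc : ∀ s q, q ∈ (pvScanProd (PySem.Set.ofList nts) nt p st.1).1.getD s [] → q ∈ prods := by
    intro s q hq
    rw [pvScanProd_eq] at hq
    rcases (sc_mem _ nt p p.toList (st.1, false) q s).1 hq with hq' | hq'
    · exact h1 s q hq'
    · rw [hq'.1]; exact hp
  unfold sbStepP
  split
  · rename_i hcond
    simp only [Bool.and_eq_true, Bool.not_eq_true'] at hcond
    obtain ⟨hsc, hnp⟩ := hcond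
    have hnpm : nt ∉ st.2.1 := by
      simpa [PySem.Set.contains, List.contains_iff_mem] using hnp
    refine ⟨hocc, ?_, PySem.Set.nodup_add _ _ h3, ?_, ?_, ?_, ?_⟩
    · intro x
      simp only [List.mem_cons, PySem.Set.mem_add]
      constructor
      · rintro (rfl | hx)
        · exact Or.inr rfl
        · exact Or.inl ((h2 x).1 hx)
      · rintro (hx | rfl)
        · exact Or.inr ((h2 x).2 hx)
        · exact Or.inl rfl
    · exact List.nodup_cons.2 ⟨fun hc => hnpm ((h2 nt).1 hc), h4⟩
    · rw [PySem.Set.add_of_not_mem hnpm]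
      simp [h5]
    · intro x hx
      rcases (PySem.Set.mem_add _ _ _).1 hx with hx' | hx'
      · exact h6 x hx'
      · rw [hx']; exact hk
    · intro x hx
      rcases (PySem.Set.mem_add _ _ _).1 hx with hx' | hx'
      · exact h7 x hx'
      · subst hx'
        have hany : p.toList.any (fun c => PySem.Set.contains (PySem.Set.ofList nts) (String.ofList [c])) = false := by
          have := sc_snd (PySem.Set.ofList nts) x p p.toList (st.1, false)
          rw [← pvScanProd_eq] at this
          rw [hsc] at this
          simpa using this.symm
        refine pvProv.mk x p hp ?_
        intro c hc hcn
        exfalso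
        have := (List.any_eq_false.1 hany) c hc
        simp [PySem.Set.contains, PySem.Set.mem_ofList] at this
        exact this hcn
  · exact ⟨hocc, h2, h3, h4, h5, h6, h7⟩

theorem sb_foldP_inv (nts keys : List String) (prods : List (String × String))
    (nt : String) (hk : nt ∈ keys) (ps : List String) (hps : ∀ p ∈ ps, (nt, p) ∈ prods)
    (st : PySem.Dict String (List (String × String)) × PySem.Set String × List String)
    (h : sbInv nts keys prods st) :
    sbInv nts keys prods (ps.foldl (sbStepP (PySem.Set.ofList nts) nt) st) := by
  induction ps generalizing st with
  | nil => exact h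
  | cons p ps ih =>
    simp only [List.foldl_cons]
    exact ih (fun p' hp' => hps p' (List.mem_cons_of_mem _ hp')) _
      (sb_stepP_inv nts keys prods nt hk p (hps p List.mem_cons_self) st h)

theorem sb_fold_inv (nts keys : List String) (prods : List (String × String))
    (l : List (String × List String))
    (hl : ∀ e ∈ l, e.1 ∈ keys ∧ ∀ p ∈ e.2, (e.1, p) ∈ prods)
    (st : PySem.Dict String (List (String × String)) × PySem.Set String × List String)
    (h : sbInv nts keys prods st) :
    sbInv nts keys prods
      (l.foldl (fun st e => e.2.foldl (sbStepP (PySem.Set.ofList nts) e.1) st) st) := by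
  induction l generalizing st with
  | nil => exact h
  | cons e l ih =>
    simp only [List.foldl_cons]
    exact ih (fun e' he' => hl e' (List.mem_cons_of_mem _ he')) _
      (sb_foldP_inv nts keys prods e.1 (hl e List.mem_cons_self).1 e.2
        (hl e List.mem_cons_self).2 st h)

theorem sb_foldP_cov (nts : List String) (nt : String) (ps : List String)
    (st : PySem.Dict String (List (String × String)) × PySem.Set String × List String) :
    (∀ p ∈ ps, ∀ c ∈ p.toList, String.ofList [c] ∈ nts →
      (nt, p) ∈ (ps.foldl (sbStepP (PySem.Set.ofList nts) nt) st).1.getD (String.ofList [c]) []) ∧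
    (∀ p ∈ ps, (p.toList.any
        (fun c => PySem.Set.contains (PySem.Set.ofList nts) (String.ofList [c])) = false) →
      nt ∈ (ps.foldl (sbStepP (PySem.Set.ofList nts) nt) st).2.1) := by
  induction ps generalizing st with
  | nil => simp
  | cons p ps ih
  => constructor
     · intro p' hp' c hc hcn
       rcases List.mem_cons.1 hp' with rfl | hp''
       · refine (sb_foldP_mono (PySem.Set.ofList nts) nt ps _).2 _ _ ?_
         have hocc : (nt, p') ∈ (pvScanProd (PySem.Set.ofList nts) nt p' st.1).1.getD (String.ofList [c]) [] := by
           rw [pvScanProd_eq]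
           refine (sc_mem _ nt p' p'.toList (st.1, false) _ _).2 (Or.inr ⟨rfl, c, hc, ?_, rfl⟩)
           simp [PySem.Set.contains, PySem.Set.mem_ofList, hcn]
         unfold sbStepP
         split <;> exact hocc
       · exact (ih _).1 p' hp'' c hc hcn
     · intro p' hp' hany
       rcases List.mem_cons.1 hp' with rfl | hp''
       · refine (sb_foldP_mono (PySem.Set.ofList nts) nt ps _).1 _ ?_
         have hsc : (pvScanProd (PySem.Set.ofList nts) nt p' st.1).2 = false := by
           rw [pvScanProd_eq, sc_snd]
           simpa using hany
         unfold sbStepP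
         rw [hsc]
         by_cases hnp : PySem.Set.contains st.2.1 nt = true
         · rw [hnp]
           simpa using (by simpa [PySem.Set.contains, List.contains_iff_mem] using hnp : nt ∈ st.2.1)
         · rw [Bool.not_eq_true] at hnp
           rw [hnp]
           simp only [Bool.not_false, Bool.and_self, if_pos]
           exact (PySem.Set.mem_add _ _ _).2 (Or.inr rfl)
       · exact (ih _).2 p' hp'' hany

theorem sb_fold_cov (nts : List String) (l : List (String × List String))
    (st : PySem.Dict String (List (String × String)) × PySem.Set String × List String) :
    (∀ e ∈ l, ∀ p ∈ e.2, ∀ c ∈ p.toList, String.ofList [c] ∈ nts →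
      (e.1, p) ∈ (l.foldl (fun st e => e.2.foldl (sbStepP (PySem.Set.ofList nts) e.1) st)
        st).1.getD (String.ofList [c]) []) ∧
    (∀ e ∈ l, ∀ p ∈ e.2, (p.toList.any
        (fun c => PySem.Set.contains (PySem.Set.ofList nts) (String.ofList [c])) = false) →
      e.1 ∈ (l.foldl (fun st e => e.2.foldl (sbStepP (PySem.Set.ofList nts) e.1) st) st).2.1) := by
  induction l generalizing st with
  | nil => simp
  | cons e l ih
  => constructor
     · intro e' he' p hp c hc hcn
       rcases List.mem_cons.1 he' with rfl | he''
       · simp only [List.foldl_cons]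
         exact (sb_fold_mono (PySem.Set.ofList nts) l _).2 _ _
           ((sb_foldP_cov nts e'.1 e'.2 st).1 p hp c hc hcn)
       · simp only [List.foldl_cons]
         exact (ih _).1 e' he'' p hp c hc hcn
     · intro e' he' p hp hany
       rcases List.mem_cons.1 he' with rfl | he''
       · simp only [List.foldl_cons]
         exact (sb_fold_mono (PySem.Set.ofList nts) l _).1 _
           ((sb_foldP_cov nts e'.1 e'.2 st).2 p hp hany)
       · simp only [List.foldl_cons]
         exact (ih _).2 e' he'' p hp hany

-- ---- B side: the worklist loop ----

-- a production all of whose nonterminal symbols are already processed (in P but no longer on the stack)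
def pvGoodE (nts P S : List String) (p : String) : Prop :=
  ∀ c ∈ p.toList, String.ofList [c] ∈ nts → (String.ofList [c] ∈ P ∧ String.ofList [c] ∉ S)

theorem pb_inner (nts : List String) (prods : List (String × String)) :
    ∀ (L : List (String × String)) (P : PySem.Set String) (S : List String),
    (∀ q ∈ L, q ∈ prods) → P.Nodup → S.Nodup → (∀ x ∈ S, x ∈ P) → pvSound nts prods P →
    ((∀ x ∈ P, x ∈ (pvInnerB (PySem.Set.ofList nts) L P S).1) ∧
     (∀ y, y ∈ (pvInnerB (PySem.Set.ofList nts) L P S).2 ↔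
        y ∈ S ∨ (y ∈ (pvInnerB (PySem.Set.ofList nts) L P S).1 ∧ y ∉ P)) ∧
     (pvInnerB (PySem.Set.ofList nts) L P S).1.Nodup ∧
     (pvInnerB (PySem.Set.ofList nts) L P S).2.Nodup ∧
     (∀ x ∈ (pvInnerB (PySem.Set.ofList nts) L P S).2, x ∈ (pvInnerB (PySem.Set.ofList nts) L P S).1) ∧
     (∀ x ∈ (pvInnerB (PySem.Set.ofList nts) L P S).1, x ∈ P ∨ ∃ q ∈ L, x = q.1) ∧
     ((pvInnerB (PySem.Set.ofList nts) L P S).1.length + S.length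
        = P.length + (pvInnerB (PySem.Set.ofList nts) L P S).2.length) ∧
     pvSound nts prods (pvInnerB (PySem.Set.ofList nts) L P S).1 ∧
     ((∀ q ∈ prods, pvGoodE nts P S q.2 → q.1 ∈ P ∨ q ∈ L) →
        ∀ q ∈ prods, pvGoodE nts (pvInnerB (PySem.Set.ofList nts) L P S).1
          (pvInnerB (PySem.Set.ofList nts) L P S).2 q.2 → q.1 ∈ (pvInnerB (PySem.Set.ofList nts) L P S).1)) := by
  intro L
  induction L with
  | nil =>
    intro P S _ hPnd hSnd hSP hs
    refine ⟨fun x hx => hx, ?_, hPnd, hSnd, hSP, fun x hx => Or.inl hx, by simp [pvInnerB], hs, ?_⟩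
    · intro y
      simp only [pvInnerB, List.foldl_nil]
      constructor
      · exact fun h => Or.inl h
      · rintro (h | ⟨h1, h2⟩)
        · exact h
        · exact absurd h1 h2
    · intro hJ q hq hg
      rcases hJ q hq hg with h | h
      · exact h
      · exact absurd h (List.not_mem_nil)
  | cons q L ih =>
    intro P S hL hPnd hSnd hSP hs
    have hstep : pvInnerB (PySem.Set.ofList nts) (q :: L) P S
        = pvInnerB (PySem.Set.ofList nts) L
            (if !(PySem.Set.contains P q.1) && pvGoodB (PySem.Set.ofList nts) P q.2 then
              PySem.Set.add P q.1 else P)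
            (if !(PySem.Set.contains P q.1) && pvGoodB (PySem.Set.ofList nts) P q.2 then
              q.1 :: S else S) := by
      unfold pvInnerB
      simp only [List.foldl_cons]
      split
      · rfl
      · rfl
    by_cases hcond : (!(PySem.Set.contains P q.1) && pvGoodB (PySem.Set.ofList nts) P q.2) = true
    · -- q.1 newly productive: recurse from (P ++ [q.1], q.1 :: S)
      simp only [Bool.and_eq_true, Bool.not_eq_true'] at hcond
      obtain ⟨hnpb, hgb⟩ := hcond
      have hnp : q.1 ∉ P := by simpa [PySem.Set.contains, List.contains_iff_mem] using hnpb
      have hgood : pvGood nts P q.2 := (pv_goodB_iff nts P q.2).1 hgb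
      have hq : q ∈ prods := hL q List.mem_cons_self
      rw [hstep, if_pos (by simp [hgb]; exact hnp), if_pos (by simp [hgb]; exact hnp)]
      have hP'nd : (PySem.Set.add P q.1).Nodup := PySem.Set.nodup_add _ _ hPnd
      have hS'nd : (q.1 :: S).Nodup := List.nodup_cons.2 ⟨fun hc => hnp (hSP _ hc), hSnd⟩
      have hSP' : ∀ x ∈ q.1 :: S, x ∈ PySem.Set.add P q.1 := by
        intro x hx
        rcases List.mem_cons.1 hx with rfl | hx'
        · exact (PySem.Set.mem_add _ _ _).2 (Or.inr rfl)
        · exact (PySem.Set.mem_add _ _ _).2 (Or.inl (hSP x hx'))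
      have hs' : pvSound nts prods (PySem.Set.add P q.1) := by
        intro x hx
        rcases (PySem.Set.mem_add _ _ _).1 hx with hx' | hx'
        · exact hs x hx'
        · subst hx'
          exact pv_prov_of_good nts prods P q.1 q.2 (by simpa using hq) hgood hs
      obtain ⟨i1, i2, i3, i4, i5, i6, i7, i8, i9⟩ :=
        ih (PySem.Set.add P q.1) (q.1 :: S) (fun q' hq' => hL q' (List.mem_cons_of_mem _ hq'))
          hP'nd hS'nd hSP' hs'
      have hq1r : q.1 ∈ (pvInnerB (PySem.Set.ofList nts) L (PySem.Set.add P q.1) (q.1 :: S)).1 :=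
        i1 q.1 ((PySem.Set.mem_add _ _ _).2 (Or.inr rfl))
      have hlenP : (PySem.Set.add P q.1).length = P.length + 1 := by
        rw [PySem.Set.add_of_not_mem hnp]; simp
      refine ⟨fun x hx => i1 x ((PySem.Set.mem_add _ _ _).2 (Or.inl hx)), ?_, i3, i4, i5, ?_, ?_, i8, ?_⟩
      · intro y
        rw [i2 y]
        simp only [List.mem_cons, PySem.Set.mem_add]
        constructor
        · rintro (⟨rfl | hy⟩ | ⟨h1, h2⟩)
          · exact Or.inr ⟨hq1r, hnp⟩
          · exact Or.inl hy
          · exact Or.inr ⟨h1, fun hc => h2 (Or.inl hc)⟩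
        · rintro (hy | ⟨h1, h2⟩)
          · exact Or.inl (Or.inr hy)
          · by_cases hc : y = q.1
            · exact Or.inl (Or.inl hc)
            · exact Or.inr ⟨h1, fun hc' => hc'.elim h2 hc⟩
      · intro x hx
        rcases i6 x hx with hx' | hx'
        · rcases (PySem.Set.mem_add _ _ _).1 hx' with h | h
          · exact Or.inl h
          · exact Or.inr ⟨q, List.mem_cons_self, h⟩
        · rcases hx' with ⟨q', hq', h⟩
          exact Or.inr ⟨q', List.mem_cons_of_mem _ hq', h⟩
      · simp only [List.length_cons] at i7 ⊢
        omega
      · intro hJ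
        refine i9 ?_
        intro q' hq' hg'
        have hgPS : pvGoodE nts P S q'.2 := by
          intro c hc hcn
          obtain ⟨h1, h2⟩ := hg' c hc hcn
          have hcq : String.ofList [c] ≠ q.1 := fun hh => h2 (hh ▸ List.mem_cons_self)
          rcases (PySem.Set.mem_add _ _ _).1 h1 with h1' | h1'
          · exact ⟨h1', fun hc' => h2 (List.mem_cons_of_mem _ hc')⟩
          · exact absurd h1' hcq
        rcases hJ q' hq' hgPS with h | h
        · exact Or.inl ((PySem.Set.mem_add _ _ _).2 (Or.inl h))
        · rcases List.mem_cons.1 h with rfl | h'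
          · exact Or.inl ((PySem.Set.mem_add _ _ _).2 (Or.inr rfl))
          · exact Or.inr h'
    · -- q skipped: state unchanged
      rw [hstep, if_neg hcond, if_neg hcond]
      obtain ⟨i1, i2, i3, i4, i5, i6, i7, i8, i9⟩ :=
        ih P S (fun q' hq' => hL q' (List.mem_cons_of_mem _ hq')) hPnd hSnd hSP hs
      refine ⟨i1, i2, i3, i4, i5, ?_, i7, i8, ?_⟩
      · intro x hx
        rcases i6 x hx with h | h
        · exact Or.inl h
        · rcases h with ⟨q', hq', h⟩
          exact Or.inr ⟨q', List.mem_cons_of_mem _ hq', h⟩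
      · intro hJ
        refine i9 ?_
        intro q' hq' hg'
        rcases hJ q' hq' hg' with h | h
        · exact Or.inl h
        · rcases List.mem_cons.1 h with rfl | h'
          · simp only [Bool.and_eq_true, Bool.not_eq_true'] at hcond
            by_cases hmem : q'.1 ∈ P
            · exact Or.inl hmem
            · exfalso
              refine hcond ⟨by simpa [PySem.Set.contains, List.contains_iff_mem] using hmem, ?_⟩
              refine (pv_goodB_iff nts P q'.2).2 ?_
              intro c hc hcn
              exact (hg' c hc hcn).1
          · exact Or.inr h'

theorem pb_loop (nts keys : List String) (prods : List (String × String))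
    (occs : PySem.Dict String (List (String × String)))
    (hov : ∀ s q, q ∈ occs.getD s [] → q ∈ prods)
    (hoc : ∀ q ∈ prods, ∀ c ∈ q.2.toList, String.ofList [c] ∈ nts →
      q ∈ occs.getD (String.ofList [c]) [])
    (hpk : ∀ q ∈ prods, q.1 ∈ keys) :
    ∀ fuel (P : PySem.Set String) (S : List String),
    P.Nodup → S.Nodup → (∀ x ∈ S, x ∈ P) → (∀ x ∈ P, x ∈ keys) →
    pvSound nts prods P →
    (∀ q ∈ prods, pvGoodE nts P S q.2 → q.1 ∈ P) →
    S.length + (PySem.Set.ofList keys).length < fuel + P.length →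
    pvSound nts prods (pvLoopB (PySem.Set.ofList nts) occs fuel P S) ∧
      pvStable nts prods (pvLoopB (PySem.Set.ofList nts) occs fuel P S) := by
  intro fuel
  induction fuel with
  | zero =>
    intro P S hPnd hSnd hSP hPk hs hJ hlt
    cases S with
    | nil =>
      rw [show pvLoopB (PySem.Set.ofList nts) occs 0 P [] = P from rfl]
      refine ⟨hs, ?_⟩
      intro q hq hg
      exact hJ q hq (fun c hc hcn => ⟨hg c hc hcn, List.not_mem_nil⟩)
    | cons x rest =>
      exfalso
      have hsub : P ⊆ PySem.Set.ofList keys := by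
        intro y hy
        exact (PySem.Set.mem_ofList _ _).2 (hPk y hy)
      have := (List.subperm_of_subset hPnd hsub).length_le
      simp only [List.length_cons] at hlt
      omega
  | succ fuel ih =>
    intro P S hPnd hSnd hSP hPk hs hJ hlt
    cases S with
    | nil =>
      rw [show pvLoopB (PySem.Set.ofList nts) occs (fuel+1) P [] = P from rfl]
      refine ⟨hs, ?_⟩
      intro q hq hg
      exact hJ q hq (fun c hc hcn => ⟨hg c hc hcn, List.not_mem_nil⟩)
    | cons x rest =>
      rw [show pvLoopB (PySem.Set.ofList nts) occs (fuel+1) P (x :: rest)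
          = pvLoopB (PySem.Set.ofList nts) occs fuel
              (pvInnerB (PySem.Set.ofList nts) (occs.getD x []) P rest).1
              (pvInnerB (PySem.Set.ofList nts) (occs.getD x []) P rest).2 from rfl]
      have hrestnd : rest.Nodup := (List.nodup_cons.1 hSnd).2
      have hxrest : x ∉ rest := (List.nodup_cons.1 hSnd).1
      have hrestP : ∀ y ∈ rest, y ∈ P := fun y hy => hSP y (List.mem_cons_of_mem _ hy)
      have hL : ∀ q ∈ occs.getD x [], q ∈ prods := fun q hq => hov x q hq
      obtain ⟨i1, i2, i3, i4, i5, i6, i7, i8, i9⟩ :=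
        pb_inner nts prods (occs.getD x []) P rest hL hPnd hrestnd hrestP hs
      have hJ' : ∀ q ∈ prods,
          pvGoodE nts (pvInnerB (PySem.Set.ofList nts) (occs.getD x []) P rest).1
            (pvInnerB (PySem.Set.ofList nts) (occs.getD x []) P rest).2 q.2 →
          q.1 ∈ (pvInnerB (PySem.Set.ofList nts) (occs.getD x []) P rest).1 := by
        refine i9 ?_
        intro q hq hg
        by_cases hx : ∃ c ∈ q.2.toList, String.ofList [c] ∈ nts ∧ String.ofList [c] = x
        · rcases hx with ⟨c, hc, hcn, hcx⟩
          exact Or.inr (hcx ▸ hoc q hq c hc hcn)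
        · refine Or.inl (hJ q hq ?_)
          intro c hc hcn
          obtain ⟨h1, h2⟩ := hg c hc hcn
          refine ⟨h1, ?_⟩
          intro hmem
          rcases List.mem_cons.1 hmem with hh | hh
          · exact hx ⟨c, hc, hcn, hh⟩
          · exact h2 hh
      refine ih _ _ i3 i4 i5 ?_ i8 hJ' ?_
      · intro y hy
        rcases i6 y hy with h | h
        · exact hPk y h
        · rcases h with ⟨q, hq, rfl⟩
          exact hpk q (hL q hq)
      · simp only [List.length_cons] at hlt
        omega

-- ---- assembly ----

theorem pv_prods_elim (items : List (String × List String)) (q : String × String)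
    (hq : q ∈ pvProds items) : ∃ e ∈ items, ∃ p ∈ e.2, q = (e.1, p) := by
  simp only [pvProds, List.mem_flatMap, List.mem_map] at hq
  rcases hq with ⟨e, he, p, hp, hqe⟩
  exact ⟨e, he, p, hp, hqe.symm⟩

theorem pv_main (grammar : List (String × List String)) (non_terminals : List String) :
    find_neperspektivne grammar non_terminals = find_neperspektivne_alt grammar non_terminals := by
  show PySem.Set.diff (PySem.Set.ofList non_terminals)
        (pvLoopA non_terminals ((PySem.Dict.ofList grammar).items)
          (((PySem.Dict.ofList grammar).items).length + 1) PySem.Set.empty)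
      = PySem.Set.diff (PySem.Set.ofList non_terminals)
        (pvLoopB (PySem.Set.ofList non_terminals)
          (pvSetupB (PySem.Set.ofList non_terminals) ((PySem.Dict.ofList grammar).items)).1
          (((PySem.Dict.ofList grammar).items).length + 1)
          (pvSetupB (PySem.Set.ofList non_terminals) ((PySem.Dict.ofList grammar).items)).2.1
          (pvSetupB (PySem.Set.ofList non_terminals) ((PySem.Dict.ofList grammar).items)).2.2)
  generalize (PySem.Dict.ofList grammar).items = items
  -- shared names
  have hKle : (PySem.Set.ofList (items.map (·.1))).length ≤ items.length := by
    have := PySem.Set.length_ofList_le (items.map (·.1))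
    simpa using this
  -- A's loop result is sound and stable
  obtain ⟨hsA, hstA⟩ := pa_loop_spec non_terminals items (items.length + 1) PySem.Set.empty
    List.nodup_nil (by intro x hx; cases hx) (by intro x hx; cases hx) (by omega)
  -- B's setup satisfies the invariant
  have hl : ∀ e ∈ items, e.1 ∈ items.map (·.1) ∧ ∀ p ∈ e.2, (e.1, p) ∈ pvProds items := by
    intro e he
    exact ⟨List.mem_map.2 ⟨e, he, rfl⟩, fun p hp => pv_mem_prods items e he p hp⟩
  have hbase : sbInv non_terminals (items.map (·.1)) (pvProds items)
      (PySem.Dict.empty, PySem.Set.empty, []) := by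
    refine ⟨?_, ?_, List.nodup_nil, List.nodup_nil, rfl, ?_, ?_⟩
    · intro s q hq
      rw [PySem.Dict.getD_empty] at hq
      cases hq
    · intro x; exact Iff.rfl
    · intro x hx; cases hx
    · intro x hx; cases hx
  obtain ⟨h1, h2, h3, h4, h5, h6, h7⟩ :=
    sb_fold_inv non_terminals (items.map (·.1)) (pvProds items) items hl _ hbase
  obtain ⟨hcov1, hcov2⟩ := sb_fold_cov non_terminals items
    (PySem.Dict.empty, PySem.Set.empty, [])
  rw [← pvSetupB_eq] at h1 h2 h3 h4 h5 h6 h7 hcov1 hcov2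
  -- B's loop result is sound and stable
  have hoc : ∀ q ∈ pvProds items, ∀ c ∈ q.2.toList, String.ofList [c] ∈ non_terminals →
      q ∈ (pvSetupB (PySem.Set.ofList non_terminals) items).1.getD (String.ofList [c]) [] := by
    intro q hq c hc hcn
    rcases pv_prods_elim items q hq with ⟨e, he, p, hp, rfl⟩
    exact hcov1 e he p hp c hc hcn
  have hpk : ∀ q ∈ pvProds items, q.1 ∈ items.map (·.1) := by
    intro q hq
    rcases pv_prods_elim items q hq with ⟨e, he, p, hp, rfl⟩
    exact List.mem_map.2 ⟨e, he, rfl⟩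
  have hJ0 : ∀ q ∈ pvProds items,
      pvGoodE non_terminals (pvSetupB (PySem.Set.ofList non_terminals) items).2.1
        (pvSetupB (PySem.Set.ofList non_terminals) items).2.2 q.2 →
      q.1 ∈ (pvSetupB (PySem.Set.ofList non_terminals) items).2.1 := by
    intro q hq hg
    rcases pv_prods_elim items q hq with ⟨e, he, p, hp, rfl⟩
    by_cases hx : ∃ c ∈ p.toList, String.ofList [c] ∈ non_terminals
    · exfalso
      rcases hx with ⟨c, hc, hcn⟩
      obtain ⟨hin, hout⟩ := hg c hc hcn
      exact hout ((h2 _).2 hin)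
    · refine hcov2 e he p hp ?_
      refine List.any_eq_false.2 ?_
      intro c hc
      simp only [PySem.Set.contains, List.contains_iff_mem, PySem.Set.mem_ofList] at *
      exact fun hcn => hx ⟨c, hc, hcn⟩
  obtain ⟨hsB, hstB⟩ := pb_loop non_terminals (items.map (·.1)) (pvProds items)
    (pvSetupB (PySem.Set.ofList non_terminals) items).1 h1 hoc hpk
    (items.length + 1)
    (pvSetupB (PySem.Set.ofList non_terminals) items).2.1
    (pvSetupB (PySem.Set.ofList non_terminals) items).2.2
    h3 h4 (fun x hx => (h2 x).1 hx) h6 h7 hJ0 (by omega)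
  -- the two productive sets have the same members, hence the two results are equal
  have hAB : ∀ x,
      x ∈ pvLoopA non_terminals items (items.length + 1) PySem.Set.empty ↔
      x ∈ pvLoopB (PySem.Set.ofList non_terminals)
            (pvSetupB (PySem.Set.ofList non_terminals) items).1 (items.length + 1)
            (pvSetupB (PySem.Set.ofList non_terminals) items).2.1
            (pvSetupB (PySem.Set.ofList non_terminals) items).2.2 := by
    intro x
    exact (pv_mem_iff_prov non_terminals (pvProds items) _ hsA hstA x).trans
      (pv_mem_iff_prov non_terminals (pvProds items) _ hsB hstB x).symm
  show List.filter _ _ = List.filter _ _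
  refine List.filter_congr ?_
  intro x _
  by_cases h : x ∈ pvLoopA non_terminals items (items.length + 1) PySem.Set.empty
  · rw [(PySem.Set.contains_iff _ _).2 h, (PySem.Set.contains_iff _ _).2 ((hAB x).1 h)]
  · have hB : x ∉ pvLoopB (PySem.Set.ofList non_terminals)
        (pvSetupB (PySem.Set.ofList non_terminals) items).1 (items.length + 1)
        (pvSetupB (PySem.Set.ofList non_terminals) items).2.1
        (pvSetupB (PySem.Set.ofList non_terminals) items).2.2 := fun hb => h ((hAB x).2 hb)
    have e1 : PySem.Set.contains (pvLoopA non_terminals items (items.length + 1) PySem.Set.empty) x = false := by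
      cases hc : PySem.Set.contains (pvLoopA non_terminals items (items.length + 1) PySem.Set.empty) x
      · rfl
      · exact absurd ((PySem.Set.contains_iff _ _).1 hc) h
    have e2 : PySem.Set.contains (pvLoopB (PySem.Set.ofList non_terminals)
        (pvSetupB (PySem.Set.ofList non_terminals) items).1 (items.length + 1)
        (pvSetupB (PySem.Set.ofList non_terminals) items).2.1
        (pvSetupB (PySem.Set.ofList non_terminals) items).2.2) x = false := by
      cases hc : PySem.Set.contains (pvLoopB (PySem.Set.ofList non_terminals)
        (pvSetupB (PySem.Set.ofList non_terminals) items).1 (items.length + 1)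
        (pvSetupB (PySem.Set.ofList non_terminals) items).2.1
        (pvSetupB (PySem.Set.ofList non_terminals) items).2.2) x
      · rfl
      · exact absurd ((PySem.Set.contains_iff _ _).1 hc) hB
    rw [e1, e2]

-- ===== VERDICT (by name: the statement is the Claim_ definition above) =====
theorem find_neperspektivne_spec : Claim_equal_find_neperspektivne := by
  intro grammar non_terminals _
  exact pv_main grammar non_terminals
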